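-- pv_equiv track=rewrite | github.com/QLerin/AdventOfCode | AOC2019/Day4.py | doesHaveSameDigits
-- ===== SOURCE A (Python) =====
-- def doesHaveSameDigits(passwordText) -> bool:
--     usedDigits = []
--     index = 0
--     while index < len(passwordText) - 1:
--         if passwordText[index] == passwordText[index + 1]:
--             if not passwordText[index] in usedDigits:
--                 if index < len(passwordText) - 2:
--                     if passwordText[index] == passwordText[index + 2]:
--                         index += 1
--                         usedDigits.append(passwordText[index])
--                         continue
--                     else:
--                         return True
--                 else:
--                     return True
--         usedDigits.append(passwordText[index])
--
--         index += 1
--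
--     return False
-- ===== SOURCE B (Python) =====
-- def doesHaveSameDigits(passwordText) -> bool:
--     seen = set()
--     i, n = 0, len(passwordText)
--     while i < n:
--         ch = passwordText[i]
--         j = i
--         while j < n and passwordText[j] == ch:
--             j += 1
--         if ch not in seen:
--             seen.add(ch)
--             if j - i == 2:
--                 return True
--         i = j
--     return False
-- ===== Notes on version B (the rewrite author's own statement) =====
-- stated objective: faster
-- what changed: Replaces A's per-index walk with two-character lookahead and a list of every visited character (linear membership scan per step) by a single run-length scan over maximal runs keeping a hash set of already-seen characters, testing each first run for length exactly 2.
import Mathlib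
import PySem

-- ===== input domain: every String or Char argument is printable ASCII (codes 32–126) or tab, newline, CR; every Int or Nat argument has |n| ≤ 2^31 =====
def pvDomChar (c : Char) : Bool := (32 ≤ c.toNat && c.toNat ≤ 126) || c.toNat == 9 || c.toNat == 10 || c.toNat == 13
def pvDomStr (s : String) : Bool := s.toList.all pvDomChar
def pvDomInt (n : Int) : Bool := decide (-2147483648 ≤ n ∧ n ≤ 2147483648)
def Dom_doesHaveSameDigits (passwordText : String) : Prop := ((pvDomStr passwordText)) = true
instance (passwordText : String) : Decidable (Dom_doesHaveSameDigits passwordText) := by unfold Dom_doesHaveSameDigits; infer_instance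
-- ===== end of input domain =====

-- B replaces A's index walk with two-step lookahead and a list of all visited chars
-- by a linear run-length scan keeping a set of characters already seen (objective: faster, measured).


-- ===== PORT A =====
-- A's while-loop over index i is transcribed as recursion over the suffix starting at i
-- (c1 = s[i], c2 = s[i+1], head of rest = s[i+2]); `used` is A's usedDigits list.
def pvALoop (l : List Char) (used : List Char) : Bool :=
  match l with
  | c1 :: c2 :: rest =>
    if c1 == c2 then
      if !(used.contains c1) then
        match rest with
        | c3 :: t => if c1 == c3 then pvALoop (c2 :: c3 :: t) (used ++ [c2]) else true
        | [] => true
      else pvALoop (c2 :: rest) (used ++ [c1])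
    else pvALoop (c2 :: rest) (used ++ [c1])
  | _ => false
termination_by l.length
decreasing_by all_goals simp

def doesHaveSameDigits (passwordText : String) : Bool :=
  pvALoop passwordText.toList []

-- ===== PORT B =====
-- Source B: scan maximal runs; `seen` is the set of characters whose first run was processed.
def pvBLoop (l : List Char) (seen : PySem.Set Char) : Bool :=
  match l with
  | [] => false
  | c :: rest =>
    if !(PySem.Set.contains seen c) then
      if (rest.takeWhile (· == c)).length + 1 == 2 then true
      else pvBLoop (rest.dropWhile (· == c)) (PySem.Set.add seen c)
    else pvBLoop (rest.dropWhile (· == c)) seen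
termination_by l.length
decreasing_by all_goals
  simp only [List.length_cons]
  exact Nat.lt_succ_of_le (List.length_dropWhile_le _ _)

def doesHaveSameDigits_alt (passwordText : String) : Bool :=
  pvBLoop passwordText.toList PySem.Set.empty

-- ===== PRECONDITION & SPEC =====
def Spec_doesHaveSameDigits (passwordText : String) (out : Bool) : Prop := out = doesHaveSameDigits_alt passwordText
instance (passwordText : String) (out : Bool) : Decidable (Spec_doesHaveSameDigits passwordText out) := by unfold Spec_doesHaveSameDigits; infer_instance

-- ===== CLAIM (what is proved, stated in full; the proofs are below) =====
def Claim_equal_doesHaveSameDigits : Prop := ∀ (passwordText : String), Dom_doesHaveSameDigits passwordText → Spec_doesHaveSameDigits passwordText (doesHaveSameDigits passwordText)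

-- ===== LEMMAS AND PROOFS =====

-- Skipping a run whose character is already in `used`: A walks through it element by
-- element, appending only copies of characters already present, B drops it at once.
lemma pvALoop_skip (c : Char) :
    ∀ (rest used : List Char), c ∈ used →
      ∃ used', (∀ d, d ∈ used' ↔ d ∈ used) ∧
        pvALoop (c :: rest) used = pvALoop (rest.dropWhile (· == c)) used' := by
  intro rest
  induction rest with
  | nil => exact fun used h => ⟨used, fun d => Iff.rfl, by simp [pvALoop]⟩
  | cons c2 r2 ih =>
    intro used h
    by_cases hc : c2 = c
    · subst hc
      obtain ⟨u', hm, he⟩ := ih (used ++ [c2]) (by simp [h])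
      refine ⟨u', fun d => ?_, ?_⟩
      · rw [hm d]; simp; intro hd; subst hd; exact h
      · conv_lhs => rw [pvALoop.eq_def]
        simp only [beq_self_eq_true, if_true, List.contains_eq_mem, h, decide_true,
          Bool.not_true, Bool.false_eq_true, if_false]
        rw [he]
        simp
    · refine ⟨used ++ [c], fun d => by simp; intro hd; subst hd; exact h, ?_⟩
      conv_lhs => rw [pvALoop.eq_def]
      have hcc : (c == c2) = false := by simp [Ne.symm hc]
      simp [hcc, hc]


lemma pvMain : ∀ (n : Nat) (l : List Char) (used : List Char) (seen : PySem.Set Char),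
    l.length ≤ n → (∀ d, d ∈ used ↔ d ∈ seen) →
    pvALoop l used = pvBLoop l seen := by
  intro n
  induction n with
  | zero =>
    intro l used seen hn _
    have : l = [] := List.eq_nil_of_length_eq_zero (Nat.le_zero.mp hn)
    subst this; simp [pvALoop, pvBLoop]
  | succ n ih =>
    intro l used seen hn hmem
    match l with
    | [] => simp [pvALoop, pvBLoop]
    | c :: rest =>
      by_cases hc : c ∈ seen
      · -- seen: both sides skip the run
        have hcu : c ∈ used := (hmem c).mpr hc
        obtain ⟨u', hm, he⟩ := pvALoop_skip c rest used hcu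
        have hb : pvBLoop (c :: rest) seen = pvBLoop (rest.dropWhile (· == c)) seen := by
          conv_lhs => rw [pvBLoop.eq_def]
          simp [hc]
        rw [hb, he]
        refine ih _ u' seen ?_ (fun d => (hm d).trans (hmem d))
        have := List.length_dropWhile_le (· == c) rest
        simp at hn; omega
      · have hcu : c ∉ used := fun h => hc ((hmem c).mp h)
        have hadd : ∀ d, d ∈ used ++ [c] ↔ d ∈ PySem.Set.add seen c := by
          intro d
          rw [PySem.Set.mem_add]
          simp [hmem d, or_comm]
        cases rest with
        | nil =>
          conv_lhs => rw [pvALoop.eq_def]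
          conv_rhs => rw [pvBLoop.eq_def]
          simp [hc, pvBLoop]
        | cons c2 r2 =>
          by_cases h2 : c2 = c
          · subst h2
            -- now the leading character is named c2 (c was eliminated)
            cases r2 with
            | nil =>
              conv_lhs => rw [pvALoop.eq_def]
              conv_rhs => rw [pvBLoop.eq_def]
              simp [hcu, hc]
            | cons c3 r3 =>
              by_cases h3 : c3 = c2
              · -- run of length ≥ 3: A appends and then skips, B drops the whole run
                conv_lhs => rw [pvALoop.eq_def]
                simp only [h3, beq_self_eq_true, if_true, List.contains_eq_mem, hcu,
                  decide_false, Bool.not_false]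
                obtain ⟨u', hm, he⟩ := pvALoop_skip c2 (c2 :: r3) (used ++ [c2]) (by simp)
                rw [he]
                conv_rhs => rw [pvBLoop.eq_def]
                have hlen : ((((c2 :: c2 :: r3).takeWhile (· == c2)).length + 1) == 2) = false := by
                  simp
                simp only [PySem.Set.contains_eq_listContains, List.contains_eq_mem, hc,
                  decide_false, Bool.not_false, if_true, hlen, Bool.false_eq_true, if_false,
                  List.dropWhile_cons, beq_self_eq_true]
                refine ih _ u' _ ?_ (fun d => (hm d).trans (hadd d))
                have := List.length_dropWhile_le (· == c2) r3
                simp at hn; omega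
              · -- run of exactly 2: both return true
                conv_lhs => rw [pvALoop.eq_def]
                conv_rhs => rw [pvBLoop.eq_def]
                have h32 : (c2 == c3) = false := by simp [Ne.symm h3]
                have h23 : (c3 == c2) = false := by simp [h3]
                simp [hcu, hc, h32, h23]
          · -- run of length 1: both step past c
            conv_lhs => rw [pvALoop.eq_def]
            conv_rhs => rw [pvBLoop.eq_def]
            have hcc : (c == c2) = false := by simp [Ne.symm h2]
            have h2c : (c2 == c) = false := by simp [h2]
            simp only [hcc, Bool.false_eq_true, if_false, List.takeWhile_cons, h2c,
              List.dropWhile_cons, PySem.Set.contains_eq_listContains, List.contains_eq_mem,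
              hc, decide_false, Bool.not_false, if_true, List.length_nil, Nat.zero_add]
            simp only [show ((0 + 1 : Nat) == 2) = false by decide, Bool.false_eq_true, if_false]
            refine ih (c2 :: r2) (used ++ [c]) (PySem.Set.add seen c) ?_ hadd
            simp at hn ⊢; omega

-- ===== VERDICT (by name: the statement is the Claim_ definition above) =====
theorem doesHaveSameDigits_spec : Claim_equal_doesHaveSameDigits := by
  intro s _
  unfold Spec_doesHaveSameDigits doesHaveSameDigits doesHaveSameDigits_alt
  exact (pvMain s.toList.length s.toList [] PySem.Set.empty le_rfl
    (fun d => by simp [PySem.Set.empty])).symm ▸ rfl
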